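-- pv_equiv track=rewrite | github.com/ekek54/BaekJoon_Python | 프로그래머스/unrated/150367. 표현 가능한 이진트리/표현 가능한 이진트리.py | solution
-- ===== SOURCE A (Python) =====
-- def solution(numbers):
--   result = []
--
--   def one_exist(binary_tree, number_of_one):
--     n = len(binary_tree)
--     mid = n // 2
--     if n == 1:
--       if binary_tree[mid] == '1':
--         number_of_one -= 1
--       return number_of_one
--     else:
--       left = binary_tree[: mid]
--       right = binary_tree[mid + 1:]
--       if binary_tree[mid] == '1':
--         number_of_one -= 1
--         number_of_one = one_exist(left, number_of_one)
--         number_of_one = one_exist(right, number_of_one)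
--       return number_of_one
--
--   for number in numbers:
--     binary_number_str = bin(number).lstrip('0b')
--     depth = 1
--     while 2 ** depth - 1 < len(binary_number_str):
--       depth += 1
--     complete_binary_tree = binary_number_str.zfill(2 ** depth - 1)
--     number_of_one = complete_binary_tree.count('1')
--     if one_exist(complete_binary_tree, number_of_one) == 0:
--       result.append(1)
--     else:
--       result.append(0)
--   return result
-- ===== SOURCE B (Python) =====
-- def solution(numbers):
--     # Validity by direct boolean recursion: a tree is expressible iff no non-'1'
--     # node has a '1' anywhere below it (instead of A's global count-and-subtract).
--     def valid(s):
--         if len(s) == 1: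
--             return True
--         mid = len(s) // 2
--         left, right = s[:mid], s[mid + 1:]
--         if s[mid] != '1':
--             return '1' not in left and '1' not in right
--         return valid(left) and valid(right)
--
--     def pad(s):
--         m = 1
--         while m < len(s):
--             m = 2 * m + 1
--         return s.zfill(m)
--
--     return [1 if valid(pad(bin(n).lstrip('0b'))) else 0 for n in numbers]
-- ===== Notes on version B (the rewrite author's own statement) =====
-- stated objective: simpler
-- what changed: A's count-all-ones-then-subtract-reachable-ones recursion (one_exist threading an integer accumulator through the whole tree) is replaced by a direct boolean recursion — a padded tree is valid iff no non-'1' node has a '1' in its subtrees — which short-circuits instead of visiting every reachable node, and the padding width is computed by growing m = 2*m+1 instead of searching a depth exponent.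
import Mathlib
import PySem

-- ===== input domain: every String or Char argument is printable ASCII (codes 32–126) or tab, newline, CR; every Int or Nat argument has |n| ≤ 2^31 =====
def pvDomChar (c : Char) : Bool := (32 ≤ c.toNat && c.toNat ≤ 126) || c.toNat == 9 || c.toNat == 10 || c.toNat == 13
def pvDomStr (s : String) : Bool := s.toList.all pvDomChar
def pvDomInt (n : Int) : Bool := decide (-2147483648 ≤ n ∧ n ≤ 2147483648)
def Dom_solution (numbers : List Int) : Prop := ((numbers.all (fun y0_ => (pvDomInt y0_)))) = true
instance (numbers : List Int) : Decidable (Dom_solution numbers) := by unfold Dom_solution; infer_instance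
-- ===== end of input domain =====

-- B replaces A's count-ones-then-subtract-reachable recursion by a direct boolean
-- validity recursion (no non-'1' node may have a '1' below it); objective: simpler.


-- ===== PORT A =====
-- bin(number).lstrip('0b'): strip the chars '0','b' from the left (exact).
def pvLstrip0b (s : List Char) : List Char := s.dropWhile (fun c => c == '0' || c == 'b')

-- 'depth = 1; while 2 ** depth - 1 < len: depth += 1' (depth stays ≥ 1, so Nat is exact).
def pvDepth (d : Nat) (L : Nat) : Nat :=
  if 2 ^ d - 1 < L then pvDepth (d + 1) L else d
termination_by L - d
decreasing_by
  have : d < 2 ^ d := Nat.lt_two_pow_self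
  omega

-- one_exist: leaf counts its '1'; an inner '1' node is counted and both children
-- are visited; pyGet? is none only on the empty string, where Python would raise —
-- never reached from the driver (the padded string has length 2^depth - 1 ≥ 1).
def oneExist (s : List Char) (k : Int) : Int :=
  let n := s.length
  let mid := n / 2
  if n = 1 then
    if PySem.List.pyGet? s (mid : Int) = some '1' then k - 1 else k
  else
    if h : PySem.List.pyGet? s (mid : Int) = some '1' then
      oneExist (PySem.List.slice s (some ((mid : Int) + 1)) none)
        (oneExist (PySem.List.slice s none (some (mid : Int))) (k - 1))
    else k
termination_by s.length
decreasing_by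
  · rw [PySem.List.slice_to_natCast]
    have hlt : s.length / 2 < s.length := by
      rcases s with _ | ⟨c, t⟩
      · simp [PySem.List.pyGet?] at h
      · exact Nat.div_lt_self (by simp) (by omega)
    simp
    omega
  · have hlt : s.length / 2 < s.length := by
      rcases s with _ | ⟨c, t⟩
      · simp [PySem.List.pyGet?] at h
      · exact Nat.div_lt_self (by simp) (by omega)
    have : ((s.length / 2 : Nat) : Int) + 1 = (((s.length / 2 + 1 : Nat)) : Int) := by push_cast; ring
    rw [this, PySem.List.slice_from_natCast]
    simp
    omega

def pvTreeA (number : Int) : List Char :=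
  let b := pvLstrip0b (PySem.Int.toBinChars0b number)
  let depth := pvDepth 1 b.length
  PySem.Chars.zfill b ((2 : Int) ^ depth - 1)

def solution (numbers : List Int) : List Int :=
  numbers.map (fun number =>
    let t := pvTreeA number
    if oneExist t ((PySem.Chars.count t ['1'] : Nat) : Int) = 0 then 1 else 0)

-- ===== PORT B =====
-- valid(s): a leaf is fine; a non-'1' inner node must have no '1' below;
-- a '1' inner node needs both subtrees valid.  (As in A's port, pyGet? = none
-- only on the empty string, unreachable from the driver.)
def pvValid (s : List Char) : Bool :=
  let n := s.length
  let mid := n / 2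
  if n = 1 then true
  else
    if h : PySem.List.pyGet? s (mid : Int) = some '1' then
      pvValid (PySem.List.slice s none (some (mid : Int))) &&
        pvValid (PySem.List.slice s (some ((mid : Int) + 1)) none)
    else
      !PySem.Chars.isIn ['1'] (PySem.List.slice s none (some (mid : Int))) &&
        !PySem.Chars.isIn ['1'] (PySem.List.slice s (some ((mid : Int) + 1)) none)
termination_by s.length
decreasing_by
  · rw [PySem.List.slice_to_natCast]
    have hlt : s.length / 2 < s.length := by
      rcases s with _ | ⟨c, t⟩
      · simp [PySem.List.pyGet?] at h
      · exact Nat.div_lt_self (by simp) (by omega)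
    simp
    omega
  · have hlt : s.length / 2 < s.length := by
      rcases s with _ | ⟨c, t⟩
      · simp [PySem.List.pyGet?] at h
      · exact Nat.div_lt_self (by simp) (by omega)
    have : ((s.length / 2 : Nat) : Int) + 1 = (((s.length / 2 + 1 : Nat)) : Int) := by push_cast; ring
    rw [this, PySem.List.slice_from_natCast]
    simp
    omega

-- 'm = 1; while m < len: m = 2*m + 1' (m stays ≥ 1, so Nat is exact).
def pvGrow (m L : Nat) : Nat :=
  if m < L then pvGrow (2 * m + 1) L else m
termination_by L - m

def pvPadB (s : List Char) : List Char :=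
  PySem.Chars.zfill s ((pvGrow 1 s.length : Nat) : Int)

def solution_alt (numbers : List Int) : List Int :=
  numbers.map (fun n =>
    if pvValid (pvPadB (pvLstrip0b (PySem.Int.toBinChars0b n))) then 1 else 0)

-- ===== PRECONDITION & SPEC =====
def Spec_solution (numbers : List Int) (out : List Int) : Prop := out = solution_alt numbers
instance (numbers : List Int) (out : List Int) : Decidable (Spec_solution numbers out) := by unfold Spec_solution; infer_instance

-- ===== CLAIM (what is proved, stated in full; the proofs are below) =====
def Claim_equal_solution : Prop := ∀ (numbers : List Int), Dom_solution numbers → Spec_solution numbers (solution numbers)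

-- ===== LEMMAS AND PROOFS =====

-- the number of '1's one_exist reaches (all ancestors '1')
def pvReach (s : List Char) : Nat :=
  let n := s.length
  let mid := n / 2
  if n = 1 then
    if PySem.List.pyGet? s (mid : Int) = some '1' then 1 else 0
  else
    if h : PySem.List.pyGet? s (mid : Int) = some '1' then
      pvReach (PySem.List.slice s none (some (mid : Int))) +
        pvReach (PySem.List.slice s (some ((mid : Int) + 1)) none) + 1
    else 0
termination_by s.length
decreasing_by
  · rw [PySem.List.slice_to_natCast]
    have hlt : s.length / 2 < s.length := by
      rcases s with _ | ⟨c, t⟩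
      · simp [PySem.List.pyGet?] at h
      · exact Nat.div_lt_self (by simp) (by omega)
    simp
    omega
  · have hlt : s.length / 2 < s.length := by
      rcases s with _ | ⟨c, t⟩
      · simp [PySem.List.pyGet?] at h
      · exact Nat.div_lt_self (by simp) (by omega)
    have : ((s.length / 2 : Nat) : Int) + 1 = (((s.length / 2 + 1 : Nat)) : Int) := by push_cast; ring
    rw [this, PySem.List.slice_from_natCast]
    simp
    omega

theorem pv_count_go_singleton (c : Char) (l : List Char) : ∀ (fuel acc : Nat),
    l.length ≤ fuel → PySem.Chars.count.go [c] fuel l acc = acc + l.count c := by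
  induction l with
  | nil => intro fuel acc _; cases fuel <;> simp [PySem.Chars.count.go]
  | cons h t ih =>
    intro fuel acc hf
    cases fuel with
    | zero => simp at hf
    | succ f =>
      rw [PySem.Chars.count.go]
      by_cases hc : c = h
      · subst hc
        simp [List.isPrefixOf, ih f (acc + 1) (by simpa using hf)]
        omega
      · simp [List.isPrefixOf, Ne.symm hc, hc, ih f acc (by simpa using hf)]

theorem pv_count_singleton (l : List Char) (c : Char) : PySem.Chars.count l [c] = l.count c := by
  rw [PySem.Chars.count]
  simpa using pv_count_go_singleton c l l.length 0 le_rfl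

theorem pv_decomp (s : List Char) (c : Char)
    (h : PySem.List.pyGet? s ((s.length / 2 : Nat) : Int) = some c) :
    PySem.List.slice s none (some ((s.length / 2 : Nat) : Int)) = s.take (s.length / 2) ∧
    PySem.List.slice s (some (((s.length / 2 : Nat) : Int) + 1)) none = s.drop (s.length / 2 + 1) ∧
    s = s.take (s.length / 2) ++ c :: s.drop (s.length / 2 + 1) ∧
    s.length / 2 < s.length := by
  have h' : s[s.length / 2]? = some c := by rw [PySem.List.pyGet?_natCast] at h; exact h
  obtain ⟨hm, hc⟩ := List.getElem?_eq_some_iff.mp h'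
  refine ⟨PySem.List.slice_to_natCast s _, ?_, ?_, hm⟩
  · have e : ((s.length / 2 : Nat) : Int) + 1 = ((s.length / 2 + 1 : Nat) : Int) := by push_cast; ring
    rw [e, PySem.List.slice_from_natCast]
  · conv_lhs => rw [← List.take_append_drop (s.length / 2) s]
    rw [List.drop_eq_getElem_cons hm, hc]

theorem oneExist_eq_sub_reach (s : List Char) (k : Int) :
    oneExist s k = k - (pvReach s : Int) := by
  suffices H : ∀ (N : Nat) (s : List Char), s.length < N → ∀ k : Int,
      oneExist s k = k - (pvReach s : Int) from H (s.length + 1) s (by omega) k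
  intro N
  induction N with
  | zero => intro s hs; exact absurd hs (by omega)
  | succ N IH =>
    intro s hs k
    rw [oneExist, pvReach]
    by_cases h1 : s.length = 1
    · simp only [h1, reduceIte]
      split <;> simp
    · simp only [if_neg h1]
      by_cases hc : PySem.List.pyGet? s ((s.length / 2 : Nat) : Int) = some '1'
      · rw [dif_pos hc, dif_pos hc]
        obtain ⟨e1, e2, e3, hm⟩ := pv_decomp s '1' hc
        rw [e1, e2, IH _ (by simp; omega), IH _ (by simp; omega)]
        push_cast
        ring
      · rw [dif_neg hc, dif_neg hc]
        simp

theorem reach_le_count (s : List Char) : pvReach s ≤ s.count '1' := by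
  suffices H : ∀ (N : Nat) (s : List Char), s.length < N → pvReach s ≤ s.count '1' from
    H (s.length + 1) s (by omega)
  intro N
  induction N with
  | zero => intro s hs; exact absurd hs (by omega)
  | succ N IH =>
    intro s hs
    rw [pvReach]
    by_cases h1 : s.length = 1
    · obtain ⟨c, rfl⟩ := List.length_eq_one_iff.mp h1
      simp only [h1, reduceIte]
      split <;> rename_i hc <;> simp_all
    · simp only [if_neg h1]
      by_cases hc : PySem.List.pyGet? s ((s.length / 2 : Nat) : Int) = some '1'
      · rw [dif_pos hc]
        obtain ⟨e1, e2, e3, hm⟩ := pv_decomp s '1' hc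
        rw [e1, e2]
        have c1 := IH (s.take (s.length / 2)) (by simp; omega)
        have c2 := IH (s.drop (s.length / 2 + 1)) (by simp; omega)
        have : s.count '1' = (s.take (s.length / 2)).count '1' +
            ((s.drop (s.length / 2 + 1)).count '1' + 1) := by
          conv_lhs => rw [e3]
          simp [List.count_append]
        omega
      · rw [dif_neg hc]
        omega

theorem valid_iff_reach_eq_count (s : List Char) :
    pvValid s = true ↔ pvReach s = s.count '1' := by
  suffices H : ∀ (N : Nat) (s : List Char), s.length < N →
      (pvValid s = true ↔ pvReach s = s.count '1') from H (s.length + 1) s (by omega)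
  intro N
  induction N with
  | zero => intro s hs; exact absurd hs (by omega)
  | succ N IH =>
    intro s hs
    rw [pvValid, pvReach]
    by_cases hnil : s = []
    · subst hnil; decide
    by_cases h1 : s.length = 1
    · obtain ⟨c, rfl⟩ := List.length_eq_one_iff.mp h1
      have hg : PySem.List.pyGet? [c] ((((1:Nat) / 2 : Nat)) : Int) = some c := by
        rw [PySem.List.pyGet?_natCast]; simp
      simp only [h1, reduceIte, hg]
      by_cases hc : c = '1' <;> simp [hc]
    · simp only [if_neg h1]
      by_cases hc : PySem.List.pyGet? s ((s.length / 2 : Nat) : Int) = some '1'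
      · rw [dif_pos hc, dif_pos hc]
        obtain ⟨e1, e2, e3, hm⟩ := pv_decomp s '1' hc
        rw [e1, e2]
        have i1 := IH (s.take (s.length / 2)) (by simp; omega)
        have i2 := IH (s.drop (s.length / 2 + 1)) (by simp; omega)
        have c1 := reach_le_count (s.take (s.length / 2))
        have c2 := reach_le_count (s.drop (s.length / 2 + 1))
        have hcount : s.count '1' = (s.take (s.length / 2)).count '1' +
            ((s.drop (s.length / 2 + 1)).count '1' + 1) := by
          conv_lhs => rw [e3]
          simp [List.count_append]
        rw [hcount]
        simp only [Bool.and_eq_true, i1, i2]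
        omega
      · rw [dif_neg hc, dif_neg hc]
        obtain ⟨c, hcget⟩ : ∃ c, PySem.List.pyGet? s ((s.length / 2 : Nat) : Int) = some c := by
          rcases s with _ | ⟨a, t⟩
          · exact absurd rfl hnil
          · rw [PySem.List.pyGet?_natCast]
            exact ⟨_, List.getElem?_eq_getElem (Nat.div_lt_self (by simp) (by omega))⟩
        have hc1 : c ≠ '1' := by rintro rfl; exact hc hcget
        obtain ⟨e1, e2, e3, hm⟩ := pv_decomp s c hcget
        rw [e1, e2]
        have hcount : s.count '1' = (s.take (s.length / 2)).count '1' +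
            (s.drop (s.length / 2 + 1)).count '1' := by
          conv_lhs => rw [e3]
          simp [List.count_append, hc1]
        rw [hcount]
        constructor
        · intro hval
          simp only [Bool.and_eq_true, Bool.not_eq_true'] at hval
          obtain ⟨hl, hr⟩ := hval
          rw [PySem.Chars.isIn_eq_false_iff, List.singleton_infix_iff] at hl hr
          rw [List.count_eq_zero.mpr hl, List.count_eq_zero.mpr hr]
        · intro hz
          simp only [Bool.and_eq_true, Bool.not_eq_true']
          constructor <;> rw [PySem.Chars.isIn_eq_false_iff, List.singleton_infix_iff,
            ← List.count_eq_zero] <;> omega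

theorem grow_eq_two_pow_depth (d L : Nat) : pvGrow (2 ^ d - 1) L = 2 ^ pvDepth d L - 1 := by
  fun_induction pvDepth d L with
  | case1 d h IH =>
    rw [pvGrow, if_pos h]
    have e : 2 * (2 ^ d - 1) + 1 = 2 ^ (d + 1) - 1 := by
      have : 1 ≤ 2 ^ d := Nat.one_le_two_pow
      rw [pow_succ]; omega
    rw [e]; exact IH
  | case2 d h => rw [pvGrow, if_neg h]

theorem pad_eq (b : List Char) :
    PySem.Chars.zfill b ((2 : Int) ^ pvDepth 1 b.length - 1) = pvPadB b := by
  have h := grow_eq_two_pow_depth 1 b.length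
  norm_num at h
  rw [pvPadB, h, Nat.cast_sub Nat.one_le_two_pow]
  push_cast
  ring_nf

-- ===== VERDICT (by name: the statement is the Claim_ definition above) =====
theorem solution_spec : Claim_equal_solution := by
  intro numbers _
  unfold Spec_solution solution solution_alt
  refine List.map_congr_left (fun x _ => ?_)
  simp only [pvTreeA, pad_eq]
  set t := pvPadB (pvLstrip0b (PySem.Int.toBinChars0b x)) with ht
  rw [oneExist_eq_sub_reach, pv_count_singleton]
  by_cases hv : pvValid t
  · have h := (valid_iff_reach_eq_count t).mp hv
    simp [hv, h]
  · have hne : pvReach t ≠ t.count '1' := fun h => hv ((valid_iff_reach_eq_count t).mpr h)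
    simp only [if_neg hv]
    rw [if_neg]
    omega
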